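-- pv_equiv track=rewrite | github.com/ystemsrx/campus-login | SWU/encrypt.py | _str_to_bt_js
-- ===== SOURCE A (Python) =====
-- def _str_to_bt_js(str_block):
--     bt = [0] * 64
--     leng = len(str_block)
--     if leng < 4:
--         for i in range(leng):
--             k = ord(str_block[i])
--             for j in range(16):
--                 # 2^(15-j)
--                 pow2 = 1 << (15 - j)
--                 bt[16 * i + j] = (k // pow2) % 2
--     else:
--         for i in range(4):
--             k = ord(str_block[i])
--             for j in range(16):
--                 pow2 = 1 << (15 - j)
--                 bt[16 * i + j] = (k // pow2) % 2
--     return bt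
-- ===== SOURCE B (Python) =====
-- def _str_to_bt_js(str_block):
--     s = str_block[:4]
--     n = 0
--     for c in s:
--         n = n * 65536 + ord(c)
--     n *= 65536 ** (4 - len(s))
--     out = []
--     for _ in range(64):
--         out.append(n % 2)
--         n //= 2
--     out.reverse()
--     return out
-- ===== Notes on version B (the rewrite author's own statement) =====
-- stated objective: alternative
-- what changed: B packs the first up-to-4 character codes into a single big integer (shifted so short strings leave trailing zero bits), then extracts its 64 bits by repeated divmod-by-2 least-significant-first and reverses, instead of A's per-character 16-bit extraction written into a preallocated zero array at computed indices.
import Mathlib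
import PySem

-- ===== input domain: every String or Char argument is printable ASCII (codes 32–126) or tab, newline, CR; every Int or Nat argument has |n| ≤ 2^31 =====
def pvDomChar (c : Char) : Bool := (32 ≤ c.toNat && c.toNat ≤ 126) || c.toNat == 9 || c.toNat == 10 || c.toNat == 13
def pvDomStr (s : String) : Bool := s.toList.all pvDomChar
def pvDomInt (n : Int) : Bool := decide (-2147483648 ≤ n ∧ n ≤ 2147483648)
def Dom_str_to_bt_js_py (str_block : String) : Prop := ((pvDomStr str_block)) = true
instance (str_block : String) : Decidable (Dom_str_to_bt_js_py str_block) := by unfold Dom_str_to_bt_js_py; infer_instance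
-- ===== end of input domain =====

-- B packs the first up-to-4 character codes into one big integer and extracts its 64 bits by
-- repeated divmod-by-2 then reversal, instead of A's indexed bit writes into a zero array.

-- ===== PORT A =====
-- literal transliteration of _str_to_bt_js: zero array of 64, nested index loops writing bits
def str_to_bt_js_py (str_block : String) : List Int :=
  let bt : List Int := List.replicate 64 0
  let cs := str_block.toList
  let leng : Int := cs.length
  if leng < 4 then
    (PySem.List.pyRange 0 leng 1).foldl (fun bt i =>
      let k : Int := ((PySem.List.pyGetD cs i ' ').toNat : Int)
      (PySem.List.pyRange 0 16 1).foldl (fun bt j =>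
        let pow2 : Int := ((1 <<< (15 - j).toNat : Nat) : Int)
        PySem.List.pySetD bt (16 * i + j) (PySem.Int.mod (PySem.Int.floordiv k pow2) 2)) bt) bt
  else
    (PySem.List.pyRange 0 4 1).foldl (fun bt i =>
      let k : Int := ((PySem.List.pyGetD cs i ' ').toNat : Int)
      (PySem.List.pyRange 0 16 1).foldl (fun bt j =>
        let pow2 : Int := ((1 <<< (15 - j).toNat : Nat) : Int)
        PySem.List.pySetD bt (16 * i + j) (PySem.Int.mod (PySem.Int.floordiv k pow2) 2)) bt) bt

-- ===== PORT B =====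
-- transliteration of Source B: pack s[:4] into one integer, shift for the missing tail,
-- peel 64 bits LSB-first with % 2 and // 2, then reverse
def str_to_bt_js_py_alt (str_block : String) : List Int :=
  let s := PySem.List.slice str_block.toList none (some 4)
  let n0 : Int := s.foldl (fun n c => n * 65536 + (c.toNat : Int)) 0
  let n1 : Int := n0 * ((65536 ^ (4 - s.length) : Nat) : Int)
  let st := (PySem.List.pyRange 0 64 1).foldl
      (fun (p : List Int × Int) _ =>
        (p.1 ++ [PySem.Int.mod p.2 2], PySem.Int.floordiv p.2 2)) (([] : List Int), n1)
  st.1.reverse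

-- ===== PRECONDITION & SPEC =====
def Spec_str_to_bt_js_py (str_block : String) (out : List Int) : Prop := out = str_to_bt_js_py_alt str_block
instance (str_block : String) (out : List Int) : Decidable (Spec_str_to_bt_js_py str_block out) := by unfold Spec_str_to_bt_js_py; infer_instance

-- ===== CLAIM (what is proved, stated in full; the proofs are below) =====
def Claim_equal_str_to_bt_js_py : Prop := ∀ (str_block : String), Dom_str_to_bt_js_py str_block → Spec_str_to_bt_js_py str_block (str_to_bt_js_py str_block)

-- ===== LEMMAS AND PROOFS =====

-- the k low bits of m, least significant first / most significant first
def pvLsb (k m : Nat) : List Int := (List.range k).map (fun j => ((m / 2 ^ j % 2 : Nat) : Int))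
def pvMsb (k m : Nat) : List Int := (List.range k).map (fun j => ((m / 2 ^ (k - 1 - j) % 2 : Nat) : Int))

-- B's 64-step loop computes the low bits LSB-first together with the shifted remainder
lemma pvLoop (k : Nat) : ∀ (m : Nat) (acc : List Int),
    (PySem.List.pyRange 0 (k : Int) 1).foldl
        (fun (p : List Int × Int) _ =>
          (p.1 ++ [PySem.Int.mod p.2 2], PySem.Int.floordiv p.2 2)) (acc, (m : Int))
      = (acc ++ pvLsb k m, ((m / 2 ^ k : Nat) : Int)) := by
  induction k with
  | zero => intro m acc; simp [PySem.List.pyRange_one_eq_nil, pvLsb]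
  | succ k ih =>
    intro m acc
    have hc : ((k + 1 : Nat) : Int) = (k : Int) + 1 := by push_cast; ring
    rw [hc, PySem.List.pyRange_one_succ_right (by positivity), List.foldl_append, ih m acc]
    simp only [List.foldl_cons, List.foldl_nil]
    have hmod : PySem.Int.mod ((m / 2 ^ k : Nat) : Int) 2 = ((m / 2 ^ k % 2 : Nat) : Int) := by
      exact_mod_cast PySem.Int.mod_natCast (m / 2 ^ k) 2
    have hdiv : PySem.Int.floordiv ((m / 2 ^ k : Nat) : Int) 2 = ((m / 2 ^ k / 2 : Nat) : Int) := by
      exact_mod_cast PySem.Int.floordiv_natCast (m / 2 ^ k) 2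
    have hsucc : pvLsb (k + 1) m = pvLsb k m ++ [((m / 2 ^ k % 2 : Nat) : Int)] := by
      simp [pvLsb, List.range_succ]
    rw [hmod, hdiv, Nat.div_div_eq_div_mul, ← pow_succ, hsucc, ← List.append_assoc]

-- reversing the LSB-first bits gives the MSB-first bits
lemma pvLsb_reverse (k m : Nat) : (pvLsb k m).reverse = pvMsb k m := by
  apply List.ext_getElem
  · simp [pvLsb, pvMsb]
  · intro j h1 h2
    simp only [pvLsb, pvMsb, List.length_reverse, List.length_map, List.length_range] at h1 h2 ⊢
    rw [List.getElem_reverse]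
    simp only [List.getElem_map, List.getElem_range, List.length_map, List.length_range]

-- splitting a packed value: the high part's bits followed by the low part's bits
lemma pvMsb_split (p q a b : Nat) (hb : b < 2 ^ q) :
    pvMsb (p + q) (a * 2 ^ q + b) = pvMsb p a ++ pvMsb q b := by
  unfold pvMsb
  rw [List.range_add, List.map_append, List.map_map]
  congr 1
  · apply List.map_congr_left
    intro j hj
    have hj' : j < p := List.mem_range.mp hj
    have he : p + q - 1 - j = q + (p - 1 - j) := by omega
    rw [he]
    congr 2
    rw [pow_add, ← Nat.div_div_eq_div_mul, Nat.add_comm (a * 2 ^ q) b,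
      Nat.add_mul_div_right b a (Nat.two_pow_pos q), Nat.div_eq_of_lt hb, Nat.zero_add]
  · apply List.map_congr_left
    intro u hu
    have hu' : u < q := List.mem_range.mp hu
    simp only [Function.comp_apply]
    have he : p + q - 1 - (p + u) = q - 1 - u := by omega
    rw [he]
    congr 1
    set t := q - 1 - u with ht
    have htq : t < q := by omega
    have hsplit : a * 2 ^ q = (a * 2 ^ (q - t - 1) * 2) * 2 ^ t := by
      rw [mul_assoc, mul_assoc, ← pow_succ', ← pow_add]
      congr 2
      omega
    rw [hsplit, Nat.add_comm, Nat.add_mul_div_right b _ (Nat.two_pow_pos t),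
      Nat.add_mul_mod_self_right]

-- the bits of zero are all zero
lemma pvMsb_zero (q : Nat) : pvMsb q 0 = List.replicate q 0 := by
  unfold pvMsb
  rw [show (fun j => (((0 : Nat) / 2 ^ (q - 1 - j) % 2 : Nat) : Int)) = fun _ => (0 : Int) from by
    funext j; simp]
  simp [List.map_const']

-- packing characters by foldl: value with a leading accumulator, and its size bound
lemma pvPack (cs : List Char) (hcs : ∀ c ∈ cs, c.toNat < 65536) :
    (∀ a : Nat, cs.foldl (fun n c => n * 65536 + c.toNat) a
        = a * 2 ^ (16 * cs.length) + cs.foldl (fun n c => n * 65536 + c.toNat) 0)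
    ∧ cs.foldl (fun n c => n * 65536 + c.toNat) 0 < 2 ^ (16 * cs.length) := by
  induction cs with
  | nil => exact ⟨fun a => by simp, by simp⟩
  | cons c cs ih =>
    obtain ⟨ih1, ih2⟩ := ih (fun x hx => hcs x (List.mem_cons_of_mem c hx))
    have hc : c.toNat < 65536 := hcs c List.mem_cons_self
    have hzero : (c :: cs).foldl (fun n c => n * 65536 + c.toNat) 0
        = c.toNat * 2 ^ (16 * cs.length) + cs.foldl (fun n c => n * 65536 + c.toNat) 0 := by
      simp only [List.foldl_cons, Nat.zero_mul, Nat.zero_add]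
      exact ih1 c.toNat
    refine ⟨fun a => ?_, ?_⟩
    · simp only [List.foldl_cons] at *
      rw [ih1 (a * 65536 + c.toNat), hzero]
      have : 16 * (c :: cs).length = 16 + 16 * cs.length := by simp; ring
      rw [this, pow_add, show (65536 : Nat) = 2 ^ 16 from by norm_num]
      ring
    · rw [hzero]
      have : 16 * (c :: cs).length = 16 + 16 * cs.length := by simp; ring
      rw [this, pow_add]
      calc c.toNat * 2 ^ (16 * cs.length) + cs.foldl (fun n c => n * 65536 + c.toNat) 0
          < c.toNat * 2 ^ (16 * cs.length) + 2 ^ (16 * cs.length) := by omega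
        _ = (c.toNat + 1) * 2 ^ (16 * cs.length) := by ring
        _ ≤ 2 ^ 16 * 2 ^ (16 * cs.length) := by
            apply Nat.mul_le_mul_right
            norm_num
            omega

-- the MSB-first bits of the packed value are the per-character 16-bit blocks
lemma pvMsb_pack (cs : List Char) (hcs : ∀ c ∈ cs, c.toNat < 65536) :
    pvMsb (16 * cs.length) (cs.foldl (fun n c => n * 65536 + c.toNat) 0)
      = cs.flatMap (fun c => pvMsb 16 c.toNat) := by
  induction cs with
  | nil => simp [pvMsb]
  | cons c cs ih =>
    have hc : c.toNat < 65536 := hcs c List.mem_cons_self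
    have hcs' : ∀ x ∈ cs, x.toNat < 65536 := fun x hx => hcs x (List.mem_cons_of_mem c hx)
    obtain ⟨h1, h2⟩ := pvPack cs hcs'
    have hzero : (c :: cs).foldl (fun n c => n * 65536 + c.toNat) 0
        = c.toNat * 2 ^ (16 * cs.length) + cs.foldl (fun n c => n * 65536 + c.toNat) 0 := by
      simp only [List.foldl_cons, Nat.zero_mul, Nat.zero_add]
      exact h1 c.toNat
    have hlen : 16 * (c :: cs).length = 16 + 16 * cs.length := by simp; ring
    rw [hzero, hlen, pvMsb_split 16 (16 * cs.length) c.toNat _ h2, ih hcs', List.flatMap_cons]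

-- the 16-bit block written as A writes it
lemma pvMsb16 (c : Char) :
    pvMsb 16 c.toNat = (List.range 16).map
      (fun u => PySem.Int.mod (PySem.Int.floordiv ((c.toNat : Nat) : Int)
        ((1 <<< (15 - u) : Nat) : Int)) 2) := by
  unfold pvMsb
  apply List.map_congr_left
  intro u hu
  have hu' : u < 16 := List.mem_range.mp hu
  have h1 : (1 <<< (15 - u) : Nat) = 2 ^ (15 - u) := Nat.one_shiftLeft _
  have h2 : 16 - 1 - u = 15 - u := by omega
  rw [h2, PySem.Int.floordiv_natCast, h1]
  exact_mod_cast (PySem.Int.mod_natCast (c.toNat / 2 ^ (15 - u)) 2).symm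

-- B's Int packing fold is the cast of the Nat packing fold
lemma pvFold_cast (cs : List Char) : ∀ a : Nat,
    cs.foldl (fun n c => n * 65536 + (c.toNat : Int)) (a : Int)
      = ((cs.foldl (fun n c => n * 65536 + c.toNat) a : Nat) : Int) := by
  induction cs with
  | nil => intro a; simp
  | cons c cs ih =>
    intro a
    simp only [List.foldl_cons]
    rw [show ((a : Int) * 65536 + (c.toNat : Int)) = ((a * 65536 + c.toNat : Nat) : Int) from by
      push_cast; ring]
    exact ih (a * 65536 + c.toNat)

-- A's inner loop starting at bit j0 overwrites the next 16 - j0 cells with the bits of k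
lemma pvInner (k : Int) (i : Nat) :
    ∀ (t j0 : Nat) (pre post : List Int), j0 + t = 16 → pre.length = 16 * i + j0 →
      t ≤ post.length →
    (PySem.List.pyRange (j0 : Int) 16 1).foldl
        (fun bt j => PySem.List.pySetD bt (16 * (i : Int) + j)
          (PySem.Int.mod (PySem.Int.floordiv k ((1 <<< (15 - j).toNat : Nat) : Int)) 2))
        (pre ++ post)
      = (pre ++ (List.range t).map
          (fun u => PySem.Int.mod (PySem.Int.floordiv k ((1 <<< (15 - (j0 + u)) : Nat) : Int)) 2))
          ++ post.drop t := by
  intro t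
  induction t with
  | zero =>
    intro j0 pre post hj hpre hpost
    have : j0 = 16 := by omega
    subst this
    rw [show PySem.List.pyRange ((16 : Nat) : Int) 16 1 = [] from rfl]
    simp
  | succ t ih =>
    intro j0 pre post hj hpre hpost
    rcases post with _ | ⟨p, ps⟩
    · simp at hpost
    rw [PySem.List.pyRange_one_cons (by omega : (j0 : Int) < 16), List.foldl_cons]
    have hidx : (16 * (i : Int) + (j0 : Int)) = ((16 * i + j0 : Nat) : Int) := by push_cast; ring
    rw [hidx, PySem.List.pySetD_natCast, ← hpre]
    have hset : (pre ++ p :: ps).set pre.length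
        (PySem.Int.mod (PySem.Int.floordiv k ((1 <<< (15 - (j0 : Int)).toNat : Nat) : Int)) 2)
        = (pre ++ [PySem.Int.mod (PySem.Int.floordiv k ((1 <<< (15 - (j0 : Int)).toNat : Nat) : Int)) 2]) ++ ps := by
      simp
    rw [hset]
    have hcast : ((j0 : Int) + 1) = ((j0 + 1 : Nat) : Int) := by push_cast; ring
    rw [hcast, ih (j0 + 1) _ ps (by omega) (by simp [hpre]; omega) (by simp at hpost; omega)]
    rw [List.range_succ_eq_map, List.map_cons, List.map_map]
    have htoNat : (15 - (j0 : Int)).toNat = 15 - (j0 + 0) := by omega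
    rw [List.drop_succ_cons, htoNat]
    have hmap : (List.range t).map
          (fun u => PySem.Int.mod (PySem.Int.floordiv k ((1 <<< (15 - (j0 + 1 + u)) : Nat) : Int)) 2)
        = (List.range t).map
          ((fun u => PySem.Int.mod (PySem.Int.floordiv k ((1 <<< (15 - (j0 + u)) : Nat) : Int)) 2) ∘ Nat.succ) := by
      apply List.map_congr_left
      intro u _
      have h : j0 + 1 + u = j0 + u.succ := by omega
      rw [Function.comp_apply, h]
    rw [hmap]
    simp [List.append_assoc]

-- A's outer loop from block i0 fills in the bits of chars i0 .. i0+t-1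
lemma pvOuter (cs : List Char) :
    ∀ (t i0 : Nat) (pre post : List Int), i0 + t ≤ cs.length → pre.length = 16 * i0 →
      16 * t ≤ post.length →
    (PySem.List.pyRange (i0 : Int) ((i0 + t : Nat) : Int) 1).foldl
        (fun bt i =>
          (PySem.List.pyRange 0 16 1).foldl
            (fun bt j => PySem.List.pySetD bt (16 * i + j)
              (PySem.Int.mod (PySem.Int.floordiv (((PySem.List.pyGetD cs i ' ').toNat : Nat) : Int)
                ((1 <<< (15 - j).toNat : Nat) : Int)) 2)) bt)
        (pre ++ post)
      = (pre ++ ((cs.drop i0).take t).flatMap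
          (fun c => (List.range 16).map
            (fun u => PySem.Int.mod (PySem.Int.floordiv ((c.toNat : Nat) : Int)
              ((1 <<< (15 - u) : Nat) : Int)) 2)))
          ++ post.drop (16 * t) := by
  intro t
  induction t with
  | zero =>
    intro i0 pre post hlen hpre hpost
    simp [PySem.List.pyRange]
  | succ t ih =>
    intro i0 pre post hlen hpre hpost
    have hi0 : i0 < cs.length := by omega
    rw [PySem.List.pyRange_one_cons (by push_cast; omega : (i0 : Int) < ((i0 + (t+1) : Nat) : Int)),
      List.foldl_cons]
    have hk : PySem.List.pyGetD cs (i0 : Int) ' ' = cs.getD i0 ' ' :=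
      PySem.List.pyGetD_natCast cs i0 ' '
    rw [hk]
    have hin := pvInner (((cs.getD i0 ' ').toNat : Nat) : Int) i0 16 0 pre post (by omega)
      (by omega) (by omega)
    simp only [Nat.cast_zero, Nat.zero_add] at hin
    rw [hin]
    have hstep : ((i0 : Int) + 1) = ((i0 + 1 : Nat) : Int) := by push_cast; ring
    have hbound : ((i0 + (t + 1) : Nat) : Int) = (((i0 + 1) + t : Nat) : Int) := by push_cast; ring
    rw [hstep, hbound,
      ih (i0 + 1) _ (post.drop 16) (by omega) (by simp [hpre, List.length_map]; ring)
        (by simp; omega)]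
    have hdropcs : cs.drop i0 = cs[i0] :: cs.drop (i0 + 1) := List.drop_eq_getElem_cons hi0
    rw [hdropcs, List.take_succ_cons, List.flatMap_cons]
    have hget : cs.getD i0 ' ' = cs[i0] := List.getD_eq_getElem cs ' ' hi0
    rw [List.drop_drop, hget]
    simp only [List.append_assoc]
    rw [show 16 + 16 * t = 16 * (t + 1) from by ring]

-- B evaluates to the per-character blocks followed by zero padding
lemma pvAltEq (s : String) (hchars : ∀ c ∈ s.toList, c.toNat < 65536) :
    str_to_bt_js_py_alt s
      = (s.toList.take 4).flatMap
          (fun c => (List.range 16).map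
            (fun u => PySem.Int.mod (PySem.Int.floordiv ((c.toNat : Nat) : Int)
              ((1 <<< (15 - u) : Nat) : Int)) 2))
        ++ List.replicate (64 - 16 * (s.toList.take 4).length) 0 := by
  simp only [str_to_bt_js_py_alt]
  rw [show PySem.List.slice s.toList none (some 4) = s.toList.take 4 from by simp [pysem]]
  set l := s.toList.take 4 with hl
  have hlchars : ∀ c ∈ l, c.toNat < 65536 := fun c hc => hchars c (List.mem_of_mem_take hc)
  have hlen : l.length ≤ 4 := by rw [hl]; simp
  have hcast := pvFold_cast l 0
  simp only [Nat.cast_zero] at hcast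
  rw [hcast]
  set m := l.foldl (fun n c => n * 65536 + c.toNat) 0 with hm
  have h65536 : (65536 : Nat) ^ (4 - l.length) = 2 ^ (16 * (4 - l.length)) := by
    rw [show (65536 : Nat) = 2 ^ 16 from by norm_num, ← pow_mul]
  rw [h65536, ← Nat.cast_mul]
  have hloop := pvLoop 64 (m * 2 ^ (16 * (4 - l.length))) []
  rw [show ((64 : Nat) : Int) = (64 : Int) from by norm_num] at hloop
  rw [hloop]
  simp only [List.nil_append]
  rw [pvLsb_reverse]
  have h64 : 64 = 16 * l.length + 16 * (4 - l.length) := by omega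
  obtain ⟨-, hbound⟩ := pvPack l hlchars
  rw [h64, show m * 2 ^ (16 * (4 - l.length))
      = m * 2 ^ (16 * (4 - l.length)) + 0 from by ring]
  have hbound0 : (0 : Nat) < 2 ^ (16 * (4 - l.length)) := by positivity
  rw [pvMsb_split (16 * l.length) (16 * (4 - l.length)) m 0 hbound0, pvMsb_zero, hm,
    pvMsb_pack l hlchars]
  congr 1
  · apply List.flatMap_congr
    intro c hc
    exact pvMsb16 c
  · congr 1
    omega

theorem str_to_bt_js_py_spec : Claim_equal_str_to_bt_js_py := by
  intro s hdom
  unfold Spec_str_to_bt_js_py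
  have hchars : ∀ c ∈ s.toList, c.toNat < 65536 := by
    intro c hc
    have h := List.all_eq_true.mp hdom c hc
    simp [pvDomChar] at h
    omega
  rw [pvAltEq s hchars]
  simp only [str_to_bt_js_py]
  by_cases h4 : s.toList.length < 4
  · rw [if_pos (by exact_mod_cast h4)]
    have hout := pvOuter s.toList s.toList.length 0 [] (List.replicate 64 (0:Int))
      (by omega) rfl (by rw [List.length_replicate]; omega)
    simp only [Nat.cast_zero, Nat.zero_add, List.nil_append, List.drop_zero] at hout
    rw [hout]
    have htake4 : s.toList.take 4 = s.toList := List.take_of_length_le (Nat.le_of_lt h4)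
    rw [htake4, List.take_length, List.drop_replicate]
  · rw [if_neg (by omega)]
    have hout := pvOuter s.toList 4 0 [] (List.replicate 64 (0:Int))
      (by omega) rfl (by simp)
    simp only [Nat.cast_zero, Nat.zero_add, Nat.cast_ofNat, List.nil_append, List.drop_zero] at hout
    rw [hout, List.drop_replicate]
    have hlen4 : (s.toList.take 4).length = 4 := by rw [List.length_take]; omega
    rw [hlen4]
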